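-- pv_equiv track=rewrite | github.com/chjw956/python_studying | algoithm_study/test2.py | bfs
-- ===== SOURCE A (Python) =====
-- from collections import deque
--
-- directions = [(-1, 0), (1, 0), (0, -1), (0, 1)]
--
-- def bfs(selected):
--     # 선택된 7명의 학생이 모두 인접해 있는지 BFS로 확인
--     q = deque([selected[0]])        # 시작 좌표
--     visited = set([selected[0]])    # 방문한 좌표 표시
--     count = 1                       # 시작점 포함
--
--     while q:
--         x, y = q.popleft()
--         for dx, dy in directions:
--             nx, ny = x + dx, y + dy
--             if (nx, ny) in selected and (nx, ny) not in visited: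
--                 visited.add((nx, ny))
--                 q.append((nx, ny))
--                 count += 1
--                 if count == 7:  # 7명 모두 연결되면 즉시 종료
--                     return True
--     return False                # 연결되지 않은 경우
-- ===== SOURCE B (Python) =====
-- directions = [(-1, 0), (1, 0), (0, -1), (0, 1)]
--
-- def bfs(selected):
--     # round-based closure: grow the component of selected[0] by whole rounds
--     # until it must be saturated, then compare its size with 7
--     comp = {selected[0]}
--     cells = set(selected)
--     for _ in range(len(cells)):
--         comp = comp | {(x, y) for (x, y) in cells
--                        if any((x + dx, y + dy) in comp for dx, dy in directions)}
--     return len(comp) >= 7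
-- ===== Notes on version B (the rewrite author's own statement) =====
-- stated objective: alternative
-- what changed: Replaced the early-exit BFS queue traversal by a round-based fixpoint closure: the component of selected[0] is grown by whole rounds (add every cell adjacent to the current set) for len(set(selected)) rounds, then its size is compared with 7.
-- outside the precondition, e.g. on bfs([]): A raises IndexError, B raises IndexError
import Mathlib
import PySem

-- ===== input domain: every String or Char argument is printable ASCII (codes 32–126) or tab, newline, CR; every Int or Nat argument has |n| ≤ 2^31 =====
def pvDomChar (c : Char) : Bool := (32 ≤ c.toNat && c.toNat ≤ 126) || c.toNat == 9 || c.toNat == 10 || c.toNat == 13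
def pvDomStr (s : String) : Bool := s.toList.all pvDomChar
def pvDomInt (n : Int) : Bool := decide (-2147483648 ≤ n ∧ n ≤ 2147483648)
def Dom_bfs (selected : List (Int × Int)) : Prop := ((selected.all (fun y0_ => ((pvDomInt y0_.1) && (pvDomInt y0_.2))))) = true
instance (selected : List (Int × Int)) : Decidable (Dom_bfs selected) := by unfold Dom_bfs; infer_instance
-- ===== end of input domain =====

-- B replaces A's early-exit BFS queue by a round-based fixpoint closure of the
-- component of selected[0]; objective: alternative (genuinely different algorithm,
-- similar cost).

-- module-level constant shared by both Python files
def pyDirections : List (Int × Int) := [(-1, 0), (1, 0), (0, -1), (0, 1)]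

-- ===== PORT A =====
-- inner 'for dx, dy in directions' loop; 'none' models 'return True'
def bfsScan (selected : List (Int × Int)) (x y : Int) :
    List (Int × Int) → List (Int × Int) → PySem.Set (Int × Int) → Int →
    Option (List (Int × Int) × PySem.Set (Int × Int) × Int)
  | [], q, visited, count => some (q, visited, count)
  | (dx, dy) :: ds, q, visited, count =>
      let nx := x + dx
      let ny := y + dy
      if selected.contains (nx, ny) && !(PySem.Set.contains visited (nx, ny)) then
        let visited' := PySem.Set.add visited (nx, ny)
        let q' := q ++ [(nx, ny)]
        let count' := count + 1
        if count' == 7 then none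
        else bfsScan selected x y ds q' visited' count'
      else bfsScan selected x y ds q visited count

-- 'while q' loop; fuel bounds the number of iterations (proved sufficient below)
def bfsLoop (selected : List (Int × Int)) :
    Nat → List (Int × Int) → PySem.Set (Int × Int) → Int → Bool
  | 0, _, _, _ => false
  | _ + 1, [], _, _ => false
  | fuel + 1, (x, y) :: qs, visited, count =>
      match bfsScan selected x y pyDirections qs visited count with
      | none => true
      | some (q', visited', count') => bfsLoop selected fuel q' visited' count'

def bfs (selected : List (Int × Int)) : Bool :=
  match selected with
  | [] => false  -- Python raises IndexError on selected[0]; excluded by Pre_bfs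
  | s :: _ =>
      bfsLoop selected (selected.length + 1) [s] (PySem.Set.ofList [s]) 1

-- ===== PORT B =====
-- any((x+dx, y+dy) in comp for dx, dy in directions)
def hasNbr (comp : PySem.Set (Int × Int)) (c : Int × Int) : Bool :=
  pyDirections.any (fun d => PySem.Set.contains comp (c.1 + d.1, c.2 + d.2))

-- comp | {(x, y) for (x, y) in cells if any(...)}
def growRound (cells : List (Int × Int)) (comp : PySem.Set (Int × Int)) :
    PySem.Set (Int × Int) :=
  PySem.Set.union comp (cells.filter (hasNbr comp))

def bfs_alt (selected : List (Int × Int)) : Bool :=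
  match selected with
  | [] => false  -- Python raises IndexError on selected[0]; excluded by Pre_bfs
  | s :: _ =>
      let cells : PySem.Set (Int × Int) := PySem.Set.ofList selected
      let comp :=
        (List.range cells.length).foldl (fun comp _ => growRound cells comp)
          (PySem.Set.ofList [s])
      decide (7 ≤ comp.length)

-- ===== PRECONDITION & SPEC =====
-- Pre_ excludes only the empty list, on which A raises IndexError at selected[0].
def Pre_bfs (selected : List (Int × Int)) : Prop := selected ≠ []
instance (selected : List (Int × Int)) : Decidable (Pre_bfs selected) := by
  unfold Pre_bfs; infer_instance

def pvWitness_bfs : (List (Int × Int)) := [(0, 0), (0, 1), (1, 1)]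

def Spec_bfs (selected : List (Int × Int)) (out : Bool) : Prop := out = bfs_alt selected
instance (selected : List (Int × Int)) (out : Bool) : Decidable (Spec_bfs selected out) := by
  unfold Spec_bfs; infer_instance

-- ===== CLAIM (what is proved, stated in full; the proofs are below) =====
def Claim_equal_bfs : Prop :=
  ∀ (selected : List (Int × Int)), Dom_bfs selected → Pre_bfs selected →
    Spec_bfs selected (bfs selected)

-- ===== LEMMAS AND PROOFS =====

-- The component B computes after k rounds, and its saturated value.
def compIter (selected : List (Int × Int)) (s : Int × Int) (k : Nat) :
    PySem.Set (Int × Int) :=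
  (List.range k).foldl (fun c _ => growRound (PySem.Set.ofList selected) c)
    (PySem.Set.ofList [s])

def compFinal (selected : List (Int × Int)) (s : Int × Int) :
    PySem.Set (Int × Int) :=
  compIter selected s (PySem.Set.ofList selected).length

lemma bfs_alt_cons (s : Int × Int) (rest : List (Int × Int)) :
    bfs_alt (s :: rest) = decide (7 ≤ (compFinal (s :: rest) s).length) := rfl

lemma nodup_subset_length {α : Type} (l1 l2 : List α) (h1 : l1.Nodup)
    (hs : ∀ a ∈ l1, a ∈ l2) : l1.length ≤ l2.length := by
  classical
  calc l1.length = l1.toFinset.card := by simp [List.toFinset_card_of_nodup h1]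
  _ ≤ l2.toFinset.card := Finset.card_le_card (fun a ha => by
        simp at ha ⊢; exact hs a ha)
  _ ≤ l2.length := l2.toFinset_card_le

lemma neg_mem_pyDirections :
    ∀ d ∈ pyDirections, (-d.1, -d.2) ∈ pyDirections := by decide

lemma mem_growRound (cells : List (Int × Int)) (comp : PySem.Set (Int × Int))
    (a : Int × Int) :
    a ∈ growRound cells comp ↔
      a ∈ comp ∨ (a ∈ cells ∧ hasNbr comp a = true) := by
  unfold growRound
  rw [show PySem.Set.union comp (cells.filter (hasNbr comp))
        = PySem.Set.update comp (cells.filter (hasNbr comp)) from rfl]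
  rw [PySem.Set.mem_update]
  simp [List.mem_filter]

lemma nodup_growRound (cells : List (Int × Int)) (comp : PySem.Set (Int × Int))
    (h : comp.Nodup) : (growRound cells comp).Nodup := by
  unfold growRound; exact PySem.Set.nodup_union _ _ h

lemma subset_growRound (cells : List (Int × Int)) (comp : PySem.Set (Int × Int)) :
    ∀ a ∈ comp, a ∈ growRound cells comp := by
  intro a ha; exact (mem_growRound cells comp a).mpr (Or.inl ha)

lemma growRound_append (cells : List (Int × Int)) (comp : PySem.Set (Int × Int)) :
    ∃ ext, growRound cells comp = comp ++ ext := by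
  unfold growRound
  rw [show PySem.Set.union comp (cells.filter (hasNbr comp))
        = PySem.Set.update comp (cells.filter (hasNbr comp)) from rfl]
  rw [PySem.Set.update_eq_append_filter]
  exact ⟨_, rfl⟩

lemma compIter_succ (selected : List (Int × Int)) (s : Int × Int) (k : Nat) :
    compIter selected s (k + 1)
      = growRound (PySem.Set.ofList selected) (compIter selected s k) := by
  unfold compIter
  rw [List.range_succ, List.foldl_append]
  rfl

lemma compIter_zero (selected : List (Int × Int)) (s : Int × Int) :
    compIter selected s 0 = [s] := rfl

lemma nodup_compIter (selected : List (Int × Int)) (s : Int × Int) (k : Nat) :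
    (compIter selected s k).Nodup := by
  induction k with
  | zero => simp [compIter_zero]
  | succ k ih => rw [compIter_succ]; exact nodup_growRound _ _ ih

lemma start_mem_compIter (selected : List (Int × Int)) (s : Int × Int) (k : Nat) :
    s ∈ compIter selected s k := by
  induction k with
  | zero => simp [compIter_zero]
  | succ k ih => rw [compIter_succ]; exact subset_growRound _ _ s ih

lemma compIter_subset_selected (selected : List (Int × Int)) (s : Int × Int)
    (hs : s ∈ selected) (k : Nat) : ∀ a ∈ compIter selected s k, a ∈ selected := by
  induction k with
  | zero => intro a ha; simp [compIter_zero] at ha; subst ha; exact hs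
  | succ k ih =>
      intro a ha
      rw [compIter_succ] at ha
      rcases (mem_growRound _ _ a).mp ha with h | ⟨hc, _⟩
      · exact ih a h
      · exact (PySem.Set.mem_ofList _ _).mp hc

lemma compFinal_closed (selected : List (Int × Int)) (s : Int × Int)
    (hs : s ∈ selected) :
    growRound (PySem.Set.ofList selected) (compFinal selected s)
      = compFinal selected s := by
  set N := (PySem.Set.ofList selected).length with hN
  have key : ∀ k : Nat,
      growRound (PySem.Set.ofList selected) (compIter selected s k)
        = compIter selected s k ∨ k + 1 ≤ (compIter selected s k).length := by
    intro k
    induction k with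
    | zero => right; simp [compIter_zero]
    | succ k ih =>
        rcases ih with hfix | hlen
        · left; rw [compIter_succ, hfix, hfix]
        · rcases growRound_append (PySem.Set.ofList selected) (compIter selected s k)
            with ⟨ext, hext⟩
          rcases List.eq_nil_or_concat' ext with rfl | _
          · left
            have h1 : compIter selected s (k + 1) = compIter selected s k := by
              rw [compIter_succ, hext, List.append_nil]
            rw [h1, hext, List.append_nil]
          · right
            rw [compIter_succ, hext, List.length_append]
            have : 1 ≤ ext.length := by
              rcases ext with _ | ⟨e, es⟩
              · simp_all
              · simp
            omega
  rcases key N with hfix | hlen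
  · exact hfix
  · exfalso
    have hsub := compIter_subset_selected selected s hs N
    have hnd := nodup_compIter selected s N
    have hle : (compIter selected s N).length ≤ N := by
      apply nodup_subset_length _ _ hnd
      intro a ha
      exact (PySem.Set.mem_ofList _ _).mpr (hsub a ha)
    omega

lemma compFinal_step (selected : List (Int × Int)) (s : Int × Int)
    (hs : s ∈ selected) (x y dx dy : Int)
    (hd : (dx, dy) ∈ pyDirections)
    (hx : (x, y) ∈ compFinal selected s)
    (hn : (x + dx, y + dy) ∈ selected) :
    (x + dx, y + dy) ∈ compFinal selected s := by
  rw [← compFinal_closed selected s hs]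
  apply (mem_growRound _ _ _).mpr
  right
  constructor
  · exact (PySem.Set.mem_ofList _ _).mpr hn
  · unfold hasNbr
    rw [List.any_eq_true]
    refine ⟨(-dx, -dy), neg_mem_pyDirections _ hd, ?_⟩
    rw [PySem.Set.contains_iff]
    have : (x + dx + -dx, y + dy + -dy) = (x, y) := by
      simp
    simpa [this] using hx

-- closedness of a visited set under one BFS neighbour step
def Closed (selected : List (Int × Int)) (V : PySem.Set (Int × Int))
    (v : Int × Int) : Prop :=
  ∀ d ∈ pyDirections, (v.1 + d.1, v.2 + d.2) ∈ selected →
    (v.1 + d.1, v.2 + d.2) ∈ V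

lemma compFinal_subset_closed (selected : List (Int × Int)) (s : Int × Int)
    (V : PySem.Set (Int × Int)) (hsV : s ∈ V)
    (hcl : ∀ v ∈ V, Closed selected V v) :
    ∀ a ∈ compFinal selected s, a ∈ V := by
  have : ∀ k, ∀ a ∈ compIter selected s k, a ∈ V := by
    intro k
    induction k with
    | zero => intro a ha; simp [compIter_zero] at ha; subst ha; exact hsV
    | succ k ih =>
        intro a ha
        rw [compIter_succ] at ha
        rcases (mem_growRound _ _ a).mp ha with h | ⟨hc, hnbr⟩
        · exact ih a h
        · unfold hasNbr at hnbr
          rw [List.any_eq_true] at hnbr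
          rcases hnbr with ⟨d, hd, hw⟩
          rw [PySem.Set.contains_iff] at hw
          have hwV : (a.1 + d.1, a.2 + d.2) ∈ V := ih _ hw
          have hnd := neg_mem_pyDirections d hd
          have := hcl _ hwV (-d.1, -d.2) hnd
          have heq : (a.1 + d.1 + -d.1, a.2 + d.2 + -d.2) = (a.1, a.2) := by
            simp
          rw [heq] at this
          have haa : (a.1, a.2) = a := rfl
          rw [haa] at this
          exact this ((PySem.Set.mem_ofList _ _).mp hc)
  exact this _

-- invariant preservation through the inner direction scan
lemma bfsScan_spec (selected : List (Int × Int)) (s : Int × Int)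
    (hs : s ∈ selected) (x y : Int)
    (hx : (x, y) ∈ compFinal selected s) :
    ∀ (ds : List (Int × Int)), ds ⊆ pyDirections →
    ∀ (q : List (Int × Int)) (V : PySem.Set (Int × Int)) (c : Int),
    V.Nodup → (∀ a ∈ q, a ∈ V) → (∀ a ∈ V, a ∈ compFinal selected s) →
    c = (V.length : Int) → c ≤ 6 →
    (bfsScan selected x y ds q V c = none → 7 ≤ (compFinal selected s).length) ∧
    (∀ q' V' c', bfsScan selected x y ds q V c = some (q', V', c') →
      V'.Nodup ∧ (∀ a ∈ q', a ∈ V') ∧ (∀ a ∈ V, a ∈ V') ∧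
      (∀ a ∈ V', a ∈ compFinal selected s) ∧
      c' = (V'.length : Int) ∧ c' ≤ 6 ∧
      q'.length + V.length = q.length + V'.length ∧
      (∀ a ∈ q, a ∈ q') ∧
      (∀ a ∈ V', a ∈ V ∨ a ∈ q') ∧
      (∀ d ∈ ds, (x + d.1, y + d.2) ∈ selected → (x + d.1, y + d.2) ∈ V')) := by
  intro ds
  induction ds with
  | nil =>
      intro _ q V c hnd hqV hVF hc hc6
      constructor
      · intro h; simp [bfsScan] at h
      · intro q' V' c' h
        simp only [bfsScan, Option.some.injEq] at h
        obtain ⟨rfl, rfl, rfl⟩ := h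
        exact ⟨hnd, hqV, fun a ha => ha, hVF, hc, hc6, rfl, fun a ha => ha,
          fun a ha => Or.inl ha, by simp⟩
  | cons d ds ih =>
      intro hds q V c hnd hqV hVF hc hc6
      obtain ⟨dx, dy⟩ := d
      have hdmem : (dx, dy) ∈ pyDirections := hds (List.mem_cons_self ..)
      have hdssub : ds ⊆ pyDirections := fun a ha => hds (List.mem_cons_of_mem _ ha)
      by_cases hcond :
          (selected.contains (x + dx, y + dy)
            && !(PySem.Set.contains V (x + dx, y + dy))) = true
      · -- the neighbour is a new cell: it is pushed and visited
        have hn_sel : (x + dx, y + dy) ∈ selected := by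
          simp only [Bool.and_eq_true] at hcond
          simpa using hcond.1
        have hn_notV : (x + dx, y + dy) ∉ V := by
          simp only [Bool.and_eq_true, Bool.not_eq_true'] at hcond
          have := hcond.2
          simp only [PySem.Set.contains_eq_listContains] at this
          simpa using this
        have hnF : (x + dx, y + dy) ∈ compFinal selected s :=
          compFinal_step selected s hs x y dx dy hdmem hx hn_sel
        have hVadd : PySem.Set.add V (x + dx, y + dy) = V ++ [(x + dx, y + dy)] :=
          PySem.Set.add_of_not_mem hn_notV
        have hnd' : (PySem.Set.add V (x + dx, y + dy)).Nodup := by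
          rw [hVadd]
          exact List.Nodup.append hnd (by simp) (by
            intro a ha hb; simp at hb; subst hb; exact hn_notV ha)
        have hlen' : (PySem.Set.add V (x + dx, y + dy)).length = V.length + 1 := by
          rw [hVadd]; simp
        have hmem' : ∀ a, a ∈ PySem.Set.add V (x + dx, y + dy) ↔
            a ∈ V ∨ a = (x + dx, y + dy) := by
          intro a; rw [hVadd]; simp
        have hVF' : ∀ a ∈ PySem.Set.add V (x + dx, y + dy),
            a ∈ compFinal selected s := by
          intro a ha
          rcases (hmem' a).mp ha with h | rfl
          · exact hVF a h
          · exact hnF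
        by_cases h7 : (c + 1 == (7 : Int)) = true
        · -- count hits 7: Python returns True
          have h7' : c + 1 = 7 := by simpa using h7
          constructor
          · intro _
            have : (PySem.Set.add V (x + dx, y + dy)).length = 7 := by omega
            have hle := nodup_subset_length _ _ hnd' hVF'
            omega
          · intro q' V' c' hsome
            exfalso
            simp only [bfsScan] at hsome
            rw [if_pos hcond, if_pos h7] at hsome
            exact absurd hsome (by simp)
        · -- count below 7: continue with the next direction
          have h7' : c + 1 ≠ 7 := by simpa using h7
          have heq : bfsScan selected x y ((dx, dy) :: ds) q V c
              = bfsScan selected x y ds (q ++ [(x + dx, y + dy)])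
                  (PySem.Set.add V (x + dx, y + dy)) (c + 1) := by
            simp only [bfsScan]
            rw [if_pos hcond, if_neg h7]
          have hih := ih hdssub (q ++ [(x + dx, y + dy)])
            (PySem.Set.add V (x + dx, y + dy)) (c + 1) hnd'
            (by
              intro a ha
              rcases List.mem_append.mp ha with h | h
              · exact (hmem' a).mpr (Or.inl (hqV a h))
              · simp at h; exact (hmem' a).mpr (Or.inr h))
            hVF'
            (by rw [hlen']; push_cast; omega)
            (by omega)
          constructor
          · intro hnone
            rw [heq] at hnone
            exact hih.1 hnone
          · intro q' V' c' hsome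
            rw [heq] at hsome
            obtain ⟨h1, h2, h3, h4, h5, h6, h7l, h8, h9, h10⟩ :=
              hih.2 q' V' c' hsome
            refine ⟨h1, h2, ?_, h4, h5, h6, ?_, ?_, ?_, ?_⟩
            · intro a ha; exact h3 a ((hmem' a).mpr (Or.inl ha))
            · rw [hlen'] at h7l; simp at h7l ⊢; omega
            · intro a ha; exact h8 a (List.mem_append.mpr (Or.inl ha))
            · intro a ha
              rcases h9 a ha with h | h
              · rcases (hmem' a).mp h with h' | rfl
                · exact Or.inl h'
                · exact Or.inr (h8 _ (List.mem_append.mpr (Or.inr (by simp))))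
              · exact Or.inr h
            · intro e he hesel
              rcases List.mem_cons.mp he with rfl | he'
              · exact h3 _ ((hmem' _).mpr (Or.inr rfl))
              · exact h10 e he' hesel
      · -- already visited or not selected: nothing happens for this direction
        have hhead : (x + dx, y + dy) ∈ selected → (x + dx, y + dy) ∈ V := by
          intro hsel
          by_contra hnot
          apply hcond
          simp only [Bool.and_eq_true, Bool.not_eq_true']
          constructor
          · simpa using hsel
          · simp only [PySem.Set.contains_eq_listContains]
            simpa using hnot
        have heq : bfsScan selected x y ((dx, dy) :: ds) q V c
            = bfsScan selected x y ds q V c := by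
          simp only [bfsScan]
          rw [if_neg hcond]
        have hih := ih hdssub q V c hnd hqV hVF hc hc6
        constructor
        · intro hnone; rw [heq] at hnone; exact hih.1 hnone
        · intro q' V' c' hsome
          rw [heq] at hsome
          obtain ⟨h1, h2, h3, h4, h5, h6, h7l, h8, h9, h10⟩ :=
            hih.2 q' V' c' hsome
          refine ⟨h1, h2, h3, h4, h5, h6, h7l, h8, h9, ?_⟩
          intro e he hesel
          rcases List.mem_cons.mp he with rfl | he'
          · exact h3 _ (hhead hesel)
          · exact h10 e he' hesel

-- the queue-exhausted case: the component is exactly the visited set, size ≤ 6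
lemma bfs_done (selected : List (Int × Int)) (s : Int × Int)
    (V : PySem.Set (Int × Int)) (c : Int)
    (hnd : V.Nodup) (hsV : s ∈ V)
    (hVF : ∀ a ∈ V, a ∈ compFinal selected s)
    (hc : c = (V.length : Int)) (hc6 : c ≤ 6)
    (hcl : ∀ v ∈ V, Closed selected V v) :
    decide (7 ≤ (compFinal selected s).length) = false := by
  have hFV := compFinal_subset_closed selected s V hsV hcl
  have hlen : (compFinal selected s).length = V.length :=
    List.Perm.length_eq ((List.perm_ext_iff_of_nodup
      (nodup_compIter selected s _) hnd).mpr
      (fun a => ⟨hFV a, hVF a⟩))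
  simp only [decide_eq_false_iff_not]
  omega

-- the while-loop computes exactly B's saturation test, given the invariants
lemma bfsLoop_spec (selected : List (Int × Int)) (s : Int × Int)
    (hs : s ∈ selected) :
    ∀ (fuel : Nat) (q : List (Int × Int)) (V : PySem.Set (Int × Int)) (c : Int),
    V.Nodup → s ∈ V → (∀ a ∈ q, a ∈ V) → (∀ a ∈ V, a ∈ compFinal selected s) →
    c = (V.length : Int) → c ≤ 6 →
    (∀ v ∈ V, v ∈ q ∨ Closed selected V v) →
    q.length + (PySem.Set.ofList selected).length ≤ fuel + V.length →
    bfsLoop selected fuel q V c = decide (7 ≤ (compFinal selected s).length) := by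
  intro fuel
  induction fuel with
  | zero =>
      intro q V c hnd hsV hqV hVF hc hc6 hcl hfuel
      have hVN : V.length ≤ (PySem.Set.ofList selected).length := by
        apply nodup_subset_length _ _ hnd
        intro a ha
        exact (PySem.Set.mem_ofList _ _).mpr
          (compIter_subset_selected selected s hs _ a (hVF a ha))
      have hq : q = [] := by
        cases q with
        | nil => rfl
        | cons a as => simp at hfuel; omega
      subst hq
      rw [show bfsLoop selected 0 [] V c = false from rfl]
      exact (bfs_done selected s V c hnd hsV hVF hc hc6
        (fun v hv => (hcl v hv).resolve_left (by simp))).symm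
  | succ fuel ih =>
      intro q V c hnd hsV hqV hVF hc hc6 hcl hfuel
      match q with
      | [] =>
          rw [show bfsLoop selected (fuel + 1) [] V c = false from rfl]
          exact (bfs_done selected s V c hnd hsV hVF hc hc6
            (fun v hv => (hcl v hv).resolve_left (by simp))).symm
      | (x, y) :: qs =>
          have hxV : (x, y) ∈ V := hqV _ (List.mem_cons_self ..)
          have hxF : (x, y) ∈ compFinal selected s := hVF _ hxV
          have hscan := bfsScan_spec selected s hs x y hxF pyDirections
            (fun a ha => ha) qs V c hnd
            (fun a ha => hqV a (List.mem_cons_of_mem _ ha)) hVF hc hc6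
          cases hres : bfsScan selected x y pyDirections qs V c with
          | none =>
              rw [show bfsLoop selected (fuel + 1) ((x, y) :: qs) V c
                  = (match bfsScan selected x y pyDirections qs V c with
                     | none => true
                     | some (q', visited', count') =>
                         bfsLoop selected fuel q' visited' count') from rfl]
              rw [hres]
              exact (decide_eq_true (hscan.1 hres)).symm
          | some r =>
              obtain ⟨q', V', c'⟩ := r
              obtain ⟨h1, h2, h3, h4, h5, h6, h7l, h8, h9, h10⟩ :=
                hscan.2 q' V' c' hres
              rw [show bfsLoop selected (fuel + 1) ((x, y) :: qs) V c
                  = (match bfsScan selected x y pyDirections qs V c with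
                     | none => true
                     | some (q', visited', count') =>
                         bfsLoop selected fuel q' visited' count') from rfl]
              rw [hres]
              apply ih q' V' c' h1 (h3 s hsV) h2 h4 h5 h6
              · intro v hv
                rcases h9 v hv with hvV | hvq'
                · rcases hcl v hvV with hvq | hvcl
                  · rcases List.mem_cons.mp hvq with rfl | hvqs
                    · right
                      intro d hd hdsel
                      exact h10 d hd hdsel
                    · exact Or.inl (h8 v hvqs)
                  · right
                    intro d hd hdsel
                    exact h3 _ (hvcl d hd hdsel)
                · exact Or.inl hvq'
              · simp at hfuel ⊢; omega

-- ===== VERDICT (by name: the statement is the Claim_ definition above) =====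
theorem bfs_spec : Claim_equal_bfs := by
  intro selected _ hpre
  unfold Spec_bfs
  cases selected with
  | nil => cases hpre rfl
  | cons s rest =>
      have hs : s ∈ s :: rest := List.mem_cons_self ..
      have hV1 : PySem.Set.ofList [s] = [s] :=
        PySem.Set.ofList_eq_self_of_nodup [s] (by simp)
      rw [bfs_alt_cons]
      rw [show bfs (s :: rest)
          = bfsLoop (s :: rest) ((s :: rest).length + 1) [s]
              (PySem.Set.ofList [s]) 1 from rfl]
      apply bfsLoop_spec (s :: rest) s hs
      · rw [hV1]; simp
      · rw [hV1]; simp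
      · intro a ha; rw [hV1]; simpa using ha
      · intro a ha
        rw [hV1] at ha
        have : a = s := by simpa using ha
        rw [this]
        exact start_mem_compIter (s :: rest) s _
      · rw [hV1]; simp
      · omega
      · intro v hv
        rw [hV1] at hv
        exact Or.inl hv
      · have := PySem.Set.length_ofList_le (s :: rest)
        simp at this ⊢
        omega
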